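-- pv_equiv track=rewrite | github.com/AlphaMoury/dashboard | Metodos.py | FMO
-- ===== SOURCE A (Python) =====
-- def FMO(columna):
--     fmo = [0, 0, 0]
--     for genero in columna:
--         if genero == 'F':
--             fmo[0] += 1
--         elif genero == 'M':
--             fmo[1] += 1
--         else:
--             fmo[2] += 1
--     return fmo
-- ===== SOURCE B (Python) =====
-- def FMO(columna):
--     col = list(columna)
--     f = col.count('F')
--     m = col.count('M')
--     return [f, m, len(col) - f - m]
-- ===== Notes on version B (the rewrite author's own statement) =====
-- stated objective: simpler
-- what changed: Replaces the single three-way-branch accumulation loop with two list.count scans for 'F' and 'M' and derives the third count as len - f - m by arithmetic.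
import Mathlib
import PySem

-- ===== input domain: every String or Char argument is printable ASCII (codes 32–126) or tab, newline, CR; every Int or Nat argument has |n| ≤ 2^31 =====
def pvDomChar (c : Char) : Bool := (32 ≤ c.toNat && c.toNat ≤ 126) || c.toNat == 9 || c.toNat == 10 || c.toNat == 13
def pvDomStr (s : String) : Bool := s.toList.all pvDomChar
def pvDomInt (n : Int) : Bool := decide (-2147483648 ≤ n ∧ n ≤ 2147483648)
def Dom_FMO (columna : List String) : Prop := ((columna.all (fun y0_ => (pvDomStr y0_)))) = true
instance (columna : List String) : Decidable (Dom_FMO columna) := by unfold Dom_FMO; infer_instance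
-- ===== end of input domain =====

-- ===== PORT A =====
-- B changes: derives counts by two list.count scans plus a len-f-m residual, instead of A's branching loop (objective: simpler).
def FMO (columna : List String) : List Int :=
  let fmo : List Int := [0, 0, 0]
  let fmo := columna.foldl (fun (fmo : List Int) genero =>
    if genero = "F" then [fmo[0]! + 1, fmo[1]!, fmo[2]!]
    else if genero = "M" then [fmo[0]!, fmo[1]! + 1, fmo[2]!]
    else [fmo[0]!, fmo[1]!, fmo[2]! + 1]) fmo
  fmo

-- ===== PORT B =====
def FMO_alt (columna : List String) : List Int :=
  let col := columna
  let f : Int := PySem.List.count col "F"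
  let m : Int := PySem.List.count col "M"
  [f, m, (col.length : Int) - f - m]

-- ===== PRECONDITION & SPEC =====
def Spec_FMO (columna : List String) (out : List Int) : Prop := out = FMO_alt columna
instance (columna : List String) (out : List Int) : Decidable (Spec_FMO columna out) := by unfold Spec_FMO; infer_instance

-- ===== CLAIM (what is proved, stated in full; the proofs are below) =====
def Claim_equal_FMO : Prop := ∀ (columna : List String), Dom_FMO columna → Spec_FMO columna (FMO columna)


-- ===== LEMMAS AND PROOFS =====
theorem FMO_loop (columna : List String) (a b c : Int) :
    columna.foldl (fun (fmo : List Int) genero =>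
      if genero = "F" then [fmo[0]! + 1, fmo[1]!, fmo[2]!]
      else if genero = "M" then [fmo[0]!, fmo[1]! + 1, fmo[2]!]
      else [fmo[0]!, fmo[1]!, fmo[2]! + 1]) [a, b, c]
    = [a + columna.count "F", b + columna.count "M",
       c + ((columna.length : Int) - columna.count "F" - columna.count "M")] := by
  induction columna generalizing a b c with
  | nil => simp
  | cons x xs ih =>
    rw [List.foldl_cons]
    by_cases hF : x = "F"
    · rw [if_pos hF]
      simp only [List.getElem!_cons_succ, List.getElem!_cons_zero]
      rw [ih]
      simp [hF]
      omega
    · by_cases hM : x = "M"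
      · rw [if_neg hF, if_pos hM]
        simp only [List.getElem!_cons_succ, List.getElem!_cons_zero]
        rw [ih]
        simp [hM]
        omega
      · rw [if_neg hF, if_neg hM]
        simp only [List.getElem!_cons_succ, List.getElem!_cons_zero]
        rw [ih]
        simp [hF, hM]
        try omega

-- ===== VERDICT (by name: the statement is the Claim_ definition above) =====
theorem FMO_spec : Claim_equal_FMO := by
  intro columna _
  unfold Spec_FMO FMO FMO_alt
  simp only [FMO_loop, PySem.List.count_eq]
  simp
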